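-- pv_equiv track=rewrite | github.com/jasson-cardoza/fundamentos-progra-ciclo1 | Laboratorios/Laboratorio 2/Ejercicio7.py | transformar_multiple
-- ===== SOURCE A (Python) =====
-- def transformar_multiple(texto, lista_opciones):
--     resultado = texto
--
--     for opcion in lista_opciones:
--         if opcion == 1:
--             resultado = resultado.upper()
--         elif opcion == 2:
--             resultado = resultado.lower()
--         elif opcion == 3:
--             resultado = resultado.capitalize()
--         else:
--             return "Opción inválida"
--
--     return resultado
-- ===== SOURCE B (Python) =====
-- # B: validate the options first, then apply only the LAST transformation:
-- # upper/lower/capitalize each produce a result independent of the string's prior casing,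
-- # so only the final option determines the output.
-- def transformar_multiple(texto, lista_opciones):
--     if any(opcion not in (1, 2, 3) for opcion in lista_opciones):
--         return "Opción inválida"
--     if not lista_opciones:
--         return texto
--     ultima = lista_opciones[-1]
--     if ultima == 1:
--         return texto.upper()
--     if ultima == 2:
--         return texto.lower()
--     return texto.capitalize()
-- ===== Notes on version B (the rewrite author's own statement) =====
-- stated objective: alternative
-- what changed: Instead of applying every transformation in sequence, B validates all options once and applies only the last one, since upper/lower/capitalize are each independent of the string's prior casing.
import Mathlib
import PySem

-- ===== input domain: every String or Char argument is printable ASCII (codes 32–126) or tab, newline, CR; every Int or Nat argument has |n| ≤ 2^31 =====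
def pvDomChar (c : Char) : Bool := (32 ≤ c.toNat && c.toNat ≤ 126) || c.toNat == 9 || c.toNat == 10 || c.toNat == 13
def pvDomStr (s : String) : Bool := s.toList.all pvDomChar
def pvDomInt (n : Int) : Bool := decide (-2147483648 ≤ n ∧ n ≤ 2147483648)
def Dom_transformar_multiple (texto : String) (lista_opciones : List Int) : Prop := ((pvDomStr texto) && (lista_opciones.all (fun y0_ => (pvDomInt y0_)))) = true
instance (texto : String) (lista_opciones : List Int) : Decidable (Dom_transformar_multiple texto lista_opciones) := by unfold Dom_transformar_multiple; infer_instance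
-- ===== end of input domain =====

-- B validates all options once and applies only the LAST transformation (each case
-- transformation is independent of the string's prior casing), instead of A's sequential loop.

-- Python str.capitalize(), ported by hand (PySem has no capitalize): first char
-- title-cased, rest lowered; exact on the ASCII domain, where titlecase = uppercase.
def pyCapitalize (s : String) : String :=
  match s.toList with
  | [] => String.ofList []
  | c :: cs => String.ofList (PySem.Chars.upperChar c :: PySem.Chars.lower cs)

-- ===== PORT A =====
-- the for-loop over lista_opciones, carrying `resultado`
def transformarGoA (resultado : String) (lista : List Int) : String :=
  match lista with
  | [] => resultado
  | opcion :: rest =>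
    if opcion = 1 then transformarGoA (PySem.Str.upper resultado) rest
    else if opcion = 2 then transformarGoA (PySem.Str.lower resultado) rest
    else if opcion = 3 then transformarGoA (pyCapitalize resultado) rest
    else "Opción inválida"

def transformar_multiple (texto : String) (lista_opciones : List Int) : String :=
  transformarGoA texto lista_opciones

-- ===== PORT B =====
def validOpt (opcion : Int) : Bool := opcion == 1 || opcion == 2 || opcion == 3

def applyLast (texto : String) (ultima : Int) : String :=
  if ultima == 1 then PySem.Str.upper texto
  else if ultima == 2 then PySem.Str.lower texto
  else pyCapitalize texto

def transformar_multiple_alt (texto : String) (lista_opciones : List Int) : String :=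
  if lista_opciones.any (fun opcion => !(validOpt opcion)) then "Opción inválida"
  else
    match lista_opciones.getLast? with
    | none => texto
    | some ultima => applyLast texto ultima

-- ===== PRECONDITION & SPEC =====
def Spec_transformar_multiple (texto : String) (lista_opciones : List Int) (out : String) : Prop := out = transformar_multiple_alt texto lista_opciones
instance (texto : String) (lista_opciones : List Int) (out : String) : Decidable (Spec_transformar_multiple texto lista_opciones out) := by unfold Spec_transformar_multiple; infer_instance

-- ===== CLAIM (what is proved, stated in full; the proofs are below) =====
def Claim_equal_transformar_multiple : Prop := ∀ (texto : String) (lista_opciones : List Int), Dom_transformar_multiple texto lista_opciones → Spec_transformar_multiple texto lista_opciones (transformar_multiple texto lista_opciones)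

-- ===== LEMMAS AND PROOFS =====

theorem islower_iff (c : Char) : PySem.Chars.islower c = true ↔ 97 ≤ c.toNat ∧ c.toNat ≤ 122 := by
  simp only [PySem.Chars.islower, Bool.and_eq_true, decide_eq_true_eq, Char.le_def,
    UInt32.le_iff_toNat_le, Char.toNat_val]
  exact ⟨fun ⟨h1, h2⟩ => ⟨h1, h2⟩, fun ⟨h1, h2⟩ => ⟨h1, h2⟩⟩

theorem isupper_iff (c : Char) : PySem.Chars.isupper c = true ↔ 65 ≤ c.toNat ∧ c.toNat ≤ 90 := by
  simp only [PySem.Chars.isupper, Bool.and_eq_true, decide_eq_true_eq, Char.le_def,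
    UInt32.le_iff_toNat_le, Char.toNat_val]
  exact ⟨fun ⟨h1, h2⟩ => ⟨h1, h2⟩, fun ⟨h1, h2⟩ => ⟨h1, h2⟩⟩

theorem upperChar_of_not_lower (c : Char) (h : PySem.Chars.islower c = false) :
    PySem.Chars.upperChar c = c := by
  simp [PySem.Chars.upperChar, h]

theorem lowerChar_of_not_upper (c : Char) (h : PySem.Chars.isupper c = false) :
    PySem.Chars.lowerChar c = c := by
  simp [PySem.Chars.lowerChar, h]

theorem toNat_upperChar (c : Char) (h : PySem.Chars.islower c = true) :
    (PySem.Chars.upperChar c).toNat = c.toNat - 32 := by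
  have hr := (islower_iff c).mp h
  simp only [PySem.Chars.upperChar, if_pos h]
  rw [Char.toNat_ofNat, if_pos]
  exact Or.inl (by omega)

theorem toNat_lowerChar (c : Char) (h : PySem.Chars.isupper c = true) :
    (PySem.Chars.lowerChar c).toNat = c.toNat + 32 := by
  have hr := (isupper_iff c).mp h
  simp only [PySem.Chars.lowerChar, if_pos h]
  rw [Char.toNat_ofNat, if_pos]
  exact Or.inl (by omega)

theorem char_eq_of_toNat (c d : Char) (h : c.toNat = d.toNat) : c = d := by
  have := congrArg Char.ofNat h
  rwa [Char.ofNat_toNat, Char.ofNat_toNat] at this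

theorem not_lower_upperChar (c : Char) : PySem.Chars.islower (PySem.Chars.upperChar c) = false := by
  by_cases h : PySem.Chars.islower c = true
  · have hn := toNat_upperChar c h
    have hr := (islower_iff c).mp h
    rw [Bool.eq_false_iff]; intro hh
    have := (islower_iff _).mp hh; omega
  · rw [upperChar_of_not_lower c (Bool.eq_false_iff.mpr h)]
    exact Bool.eq_false_iff.mpr h

theorem not_upper_lowerChar (c : Char) : PySem.Chars.isupper (PySem.Chars.lowerChar c) = false := by
  by_cases h : PySem.Chars.isupper c = true
  · have hn := toNat_lowerChar c h
    have hr := (isupper_iff c).mp h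
    rw [Bool.eq_false_iff]; intro hh
    have := (isupper_iff _).mp hh; omega
  · rw [lowerChar_of_not_upper c (Bool.eq_false_iff.mpr h)]
    exact Bool.eq_false_iff.mpr h

theorem upperChar_upperChar (c : Char) :
    PySem.Chars.upperChar (PySem.Chars.upperChar c) = PySem.Chars.upperChar c :=
  upperChar_of_not_lower _ (not_lower_upperChar c)

theorem lowerChar_lowerChar (c : Char) :
    PySem.Chars.lowerChar (PySem.Chars.lowerChar c) = PySem.Chars.lowerChar c :=
  lowerChar_of_not_upper _ (not_upper_lowerChar c)

theorem lowerChar_upperChar (c : Char) :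
    PySem.Chars.lowerChar (PySem.Chars.upperChar c) = PySem.Chars.lowerChar c := by
  by_cases h : PySem.Chars.islower c = true
  · have hn := toNat_upperChar c h
    have hr := (islower_iff c).mp h
    have hu : PySem.Chars.isupper (PySem.Chars.upperChar c) = true :=
      (isupper_iff _).mpr (by omega)
    have hnc : PySem.Chars.isupper c = false := by
      rw [Bool.eq_false_iff]; intro hh; have := (isupper_iff c).mp hh; omega
    rw [lowerChar_of_not_upper c hnc]
    apply char_eq_of_toNat
    rw [toNat_lowerChar _ hu, hn]
    omega
  · rw [upperChar_of_not_lower c (Bool.eq_false_iff.mpr h)]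

theorem upperChar_lowerChar (c : Char) :
    PySem.Chars.upperChar (PySem.Chars.lowerChar c) = PySem.Chars.upperChar c := by
  by_cases h : PySem.Chars.isupper c = true
  · have hn := toNat_lowerChar c h
    have hr := (isupper_iff c).mp h
    have hl : PySem.Chars.islower (PySem.Chars.lowerChar c) = true :=
      (islower_iff _).mpr (by omega)
    have hnc : PySem.Chars.islower c = false := by
      rw [Bool.eq_false_iff]; intro hh; have := (islower_iff c).mp hh; omega
    rw [upperChar_of_not_lower c hnc]
    apply char_eq_of_toNat
    rw [toNat_upperChar _ hl, hn]
    omega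
  · rw [lowerChar_of_not_upper c (Bool.eq_false_iff.mpr h)]

-- list-level compositions
theorem lower_upper_list (l : List Char) :
    PySem.Chars.lower (PySem.Chars.upper l) = PySem.Chars.lower l := by
  simp [PySem.Chars.lower, PySem.Chars.upper, Function.comp_def, lowerChar_upperChar]

theorem lower_lower_list (l : List Char) :
    PySem.Chars.lower (PySem.Chars.lower l) = PySem.Chars.lower l := by
  simp [PySem.Chars.lower, Function.comp_def, lowerChar_lowerChar]

theorem upper_upper_list (l : List Char) :
    PySem.Chars.upper (PySem.Chars.upper l) = PySem.Chars.upper l := by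
  simp [PySem.Chars.upper, Function.comp_def, upperChar_upperChar]

theorem upper_lower_list (l : List Char) :
    PySem.Chars.upper (PySem.Chars.lower l) = PySem.Chars.upper l := by
  simp [PySem.Chars.lower, PySem.Chars.upper, Function.comp_def, upperChar_lowerChar]

theorem toList_pyCapitalize (s : String) :
    (pyCapitalize s).toList = match s.toList with
      | [] => []
      | c :: cs => PySem.Chars.upperChar c :: PySem.Chars.lower cs := by
  unfold pyCapitalize
  cases s.toList <;> simp

theorem applyLast_one (s : String) : applyLast s 1 = PySem.Str.upper s := by
  simp [applyLast]

theorem applyLast_two (s : String) : applyLast s 2 = PySem.Str.lower s := by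
  simp [applyLast]

theorem applyLast_three (s : String) : applyLast s 3 = pyCapitalize s := by
  simp [applyLast]

-- the second of two case transformations wins: each of upper/lower/capitalize applied
-- after applyLast (with a valid first option) equals the same applied to the original
theorem upper_applyLast (s : String) (o : Int) (ho : validOpt o = true) :
    PySem.Str.upper (applyLast s o) = PySem.Str.upper s := by
  simp only [validOpt, Bool.or_eq_true, beq_iff_eq] at ho
  apply String.toList_inj.mp
  rcases ho with (h | h) | h <;> subst h
  · rw [applyLast_one]
    simp [PySem.Str.toList_upper, upper_upper_list]
  · rw [applyLast_two]
    simp [PySem.Str.toList_upper, PySem.Str.toList_lower, upper_lower_list]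
  · rw [applyLast_three, PySem.Str.toList_upper, PySem.Str.toList_upper, toList_pyCapitalize]
    cases hs : s.toList with
    | nil => rfl
    | cons c cs =>
      simp only [PySem.Chars.upper, List.map_cons, upperChar_upperChar]
      rw [show List.map PySem.Chars.upperChar (PySem.Chars.lower cs) = PySem.Chars.upper (PySem.Chars.lower cs) from rfl,
          upper_lower_list]
      rfl

theorem lower_applyLast (s : String) (o : Int) (ho : validOpt o = true) :
    PySem.Str.lower (applyLast s o) = PySem.Str.lower s := by
  simp only [validOpt, Bool.or_eq_true, beq_iff_eq] at ho
  apply String.toList_inj.mp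
  rcases ho with (h | h) | h <;> subst h
  · rw [applyLast_one]
    simp [PySem.Str.toList_lower, PySem.Str.toList_upper, lower_upper_list]
  · rw [applyLast_two]
    simp [PySem.Str.toList_lower, lower_lower_list]
  · rw [applyLast_three, PySem.Str.toList_lower, PySem.Str.toList_lower, toList_pyCapitalize]
    cases hs : s.toList with
    | nil => rfl
    | cons c cs =>
      simp only [PySem.Chars.lower, List.map_cons, lowerChar_upperChar]
      rw [show List.map PySem.Chars.lowerChar (List.map PySem.Chars.lowerChar cs) = PySem.Chars.lower (PySem.Chars.lower cs) from rfl,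
          lower_lower_list]
      rfl

theorem cap_applyLast (s : String) (o : Int) (ho : validOpt o = true) :
    pyCapitalize (applyLast s o) = pyCapitalize s := by
  simp only [validOpt, Bool.or_eq_true, beq_iff_eq] at ho
  apply String.toList_inj.mp
  rcases ho with (h | h) | h <;> subst h <;>
    rw [toList_pyCapitalize, toList_pyCapitalize]
  · rw [applyLast_one, PySem.Str.toList_upper]
    cases hs : s.toList with
    | nil => rfl
    | cons c cs =>
      simp only [PySem.Chars.upper, List.map_cons]
      rw [upperChar_upperChar,
          show List.map PySem.Chars.upperChar cs = PySem.Chars.upper cs from rfl, lower_upper_list]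
  · rw [applyLast_two, PySem.Str.toList_lower]
    cases hs : s.toList with
    | nil => rfl
    | cons c cs =>
      simp only [PySem.Chars.lower, List.map_cons]
      rw [upperChar_lowerChar]
      exact congrArg (List.cons (PySem.Chars.upperChar c)) (lower_lower_list cs)
  · rw [applyLast_three, toList_pyCapitalize]
    cases hs : s.toList with
    | nil => rfl
    | cons c cs => simp [upperChar_upperChar, lower_lower_list]

theorem applyLast_applyLast (s : String) (o u : Int) (ho : validOpt o = true) :
    applyLast (applyLast s o) u = applyLast s u := by
  conv_lhs => rw [applyLast]
  conv_rhs => rw [applyLast]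
  split_ifs
  · exact upper_applyLast s o ho
  · exact lower_applyLast s o ho
  · exact cap_applyLast s o ho

-- one iteration of A's loop with a valid option applies exactly applyLast
theorem goA_step (s : String) (o : Int) (rest : List Int) (ho : validOpt o = true) :
    transformarGoA s (o :: rest) = transformarGoA (applyLast s o) rest := by
  simp only [validOpt, Bool.or_eq_true, beq_iff_eq] at ho
  rcases ho with (h | h) | h <;> subst h
  · rw [transformarGoA, applyLast_one]; norm_num
  · rw [transformarGoA, applyLast_two]; norm_num
  · rw [transformarGoA, applyLast_three]; norm_num

-- characterisation of A's loop, by induction on the option list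
theorem goA_spec (l : List Int) (s : String) :
    transformarGoA s l =
      if l.any (fun opcion => !(validOpt opcion)) then "Opción inválida"
      else match l.getLast? with
        | none => s
        | some u => applyLast s u := by
  induction l generalizing s with
  | nil => simp [transformarGoA]
  | cons o rest ih =>
    by_cases ho : validOpt o = true
    · rw [goA_step s o rest ho, ih]
      have hno : (!validOpt o) = false := by rw [ho]; rfl
      simp only [List.any_cons, hno, Bool.false_or]
      split_ifs with hany
      · rfl
      · cases rest with
        | nil => simp
        | cons r rs =>
          have hlast : (r :: rs).getLast? = some ((r :: rs).getLast (by simp)) :=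
            List.getLast?_eq_some_getLast (by simp)
          simp only [List.getLast?_cons_cons, hlast]
          exact applyLast_applyLast s o _ ho
    · have ho' : validOpt o = false := Bool.eq_false_iff.mpr ho
      have hbranch : transformarGoA s (o :: rest) = "Opción inválida" := by
        simp only [validOpt, Bool.or_eq_true, beq_iff_eq] at ho
        rw [not_or, not_or] at ho
        unfold transformarGoA
        simp [ho.1.1, ho.1.2, ho.2]
      rw [hbranch]
      simp [ho']

-- ===== VERDICT (by name: the statement is the Claim_ definition above) =====
theorem transformar_multiple_spec : Claim_equal_transformar_multiple := by
  intro texto lista_opciones _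
  unfold Spec_transformar_multiple transformar_multiple transformar_multiple_alt
  rw [goA_spec]
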